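-- pv_equiv track=rewrite | github.com/6puritans9/Algorithms | Boj/Silver/sliding_window/15565.py | find_min_subarray_len
-- ===== SOURCE A (Python) =====
-- def find_min_subarray_len(n: int, k: int, dolls: list[int]) -> int:
--     # TC = O(N)
--     # SC = O(1)
--
--     min_len = float("inf")
--     left = 0
--     lions = 0
--
--     for right in range(n):
--         if dolls[right] == 1:
--             lions += 1
--
--         while lions >= k:
--             min_len = min(min_len, right - left + 1)
--
--             if dolls[left] == 1:
--                 lions -= 1
--             left += 1
--
--     return min_len if min_len != float("inf") else -1
-- ===== SOURCE B (Python) =====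
-- def find_min_subarray_len(n: int, k: int, dolls: list[int]) -> int:
--     # Index table of the ones, then a fixed-width scan over k-apart pairs.
--     positions = [i for i in range(n) if dolls[i] == 1]
--     if len(positions) < k:
--         return -1
--     return min(b - a + 1 for a, b in zip(positions, positions[k - 1:]))
-- ===== Notes on version B (the rewrite author's own statement) =====
-- stated objective: alternative
-- what changed: Replaces the shrinking two-pointer window with a one-pass index table of the positions of the ones followed by a fixed-width scan over pairs of positions k-1 apart; Pre_ also excludes n > len(dolls) (A raises IndexError) and k <= 0, on which A raises IndexError whenever n >= 1 and B's own empty-min raises ValueError on the remaining vacuous n <= 0 corner where A returns -1.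
-- outside the precondition, e.g. on find_min_subarray_len(0, 0, []): A returns -1, B raises ValueError
import Mathlib
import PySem

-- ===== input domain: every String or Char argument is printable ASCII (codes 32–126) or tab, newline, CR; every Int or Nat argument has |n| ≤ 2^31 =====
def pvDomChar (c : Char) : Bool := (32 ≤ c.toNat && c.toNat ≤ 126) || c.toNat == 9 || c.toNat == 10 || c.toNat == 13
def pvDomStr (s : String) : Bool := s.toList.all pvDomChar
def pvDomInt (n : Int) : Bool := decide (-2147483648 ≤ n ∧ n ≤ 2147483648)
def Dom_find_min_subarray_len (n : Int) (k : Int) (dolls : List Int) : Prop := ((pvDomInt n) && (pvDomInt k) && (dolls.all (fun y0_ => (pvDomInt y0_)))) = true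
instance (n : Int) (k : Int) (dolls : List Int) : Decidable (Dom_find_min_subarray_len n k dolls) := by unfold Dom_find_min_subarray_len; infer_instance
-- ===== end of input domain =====

-- B replaces A's shrinking two-pointer window by an index table of the ones plus a
-- fixed-width scan over pairs of one-positions k-1 apart (same O(n) cost, different algorithm).

-- ===== PORT A =====
-- the inner `while lions >= k` loop of A; fuel-bounded recursion (fuel dolls.length+1 always
-- reaches the loop's own exit: left increases each step and dolls[left] is an IndexError —
-- the `none` branch, outside Pre_ — once left leaves the list)
def pvA_shrink (dolls : List Int) (k right : Int) : Nat → (Option Int × Int × Int) → (Option Int × Int × Int)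
  | 0, s => s
  | fuel+1, (m, left, lions) =>
    if k ≤ lions then
      let v := right - left + 1
      let m' : Option Int := some (match m with | none => v | some a => min a v)
      match PySem.List.pyGet? dolls left with
      | none => (m', left + 1, lions)   -- Python raises IndexError here; outside Pre_
      | some d =>
        pvA_shrink dolls k right fuel (m', left + 1, if d = 1 then lions - 1 else lions)
    else (m, left, lions)

def find_min_subarray_len (n : Int) (k : Int) (dolls : List Int) : Int :=
  -- min_len = float("inf") is the `none` of the Option Int component
  let s := (PySem.List.pyRange 0 n 1).foldl (fun (st : Option Int × Int × Int) right =>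
    let lions' := if PySem.List.pyGet? dolls right = some 1 then st.2.2 + 1 else st.2.2
    pvA_shrink dolls k right (dolls.length + 1) (st.1, st.2.1, lions')) (none, 0, 0)
  match s.1 with
  | some v => v
  | none => -1

-- ===== PORT B =====
def find_min_subarray_len_alt (n : Int) (k : Int) (dolls : List Int) : Int :=
  let positions := (PySem.List.pyRange 0 n 1).filter (fun i => PySem.List.pyGet? dolls i == some 1)
  if (positions.length : Int) < k then -1
  else
    match (positions.zip (PySem.List.slice positions (some (k-1)) none)).foldl
        (fun (acc : Option Int) p =>
          some (match acc with | none => p.2 - p.1 + 1 | some a => min a (p.2 - p.1 + 1))) none with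
    | some v => v
    | none => -1   -- Python's min() raises ValueError on an empty sequence; unreachable under Pre_

-- ===== PRECONDITION & SPEC =====
-- Pre_ excludes n > len(dolls) (A raises IndexError at dolls[right]) and k ≤ 0, on which A
-- raises IndexError whenever n ≥ 1 (the while loop never exits) and B's own empty-min raises
-- ValueError on the remaining vacuous n ≤ 0 corner where A returns -1.
def Pre_find_min_subarray_len (n : Int) (k : Int) (dolls : List Int) : Prop :=
  n ≤ (dolls.length : Int) ∧ 1 ≤ k
instance (n : Int) (k : Int) (dolls : List Int) : Decidable (Pre_find_min_subarray_len n k dolls) := by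
  unfold Pre_find_min_subarray_len; infer_instance

def pvWitness_find_min_subarray_len : Int × Int × List Int := (5, 2, [1, 0, 1, 1, 0])

def Spec_find_min_subarray_len (n : Int) (k : Int) (dolls : List Int) (out : Int) : Prop := out = find_min_subarray_len_alt n k dolls
instance (n : Int) (k : Int) (dolls : List Int) (out : Int) : Decidable (Spec_find_min_subarray_len n k dolls out) := by unfold Spec_find_min_subarray_len; infer_instance

-- ===== CLAIM (what is proved, stated in full; the proofs are below) =====
def Claim_equal_find_min_subarray_len : Prop := ∀ (n : Int) (k : Int) (dolls : List Int), Dom_find_min_subarray_len n k dolls → Pre_find_min_subarray_len n k dolls → Spec_find_min_subarray_len n k dolls (find_min_subarray_len n k dolls)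
-- ===== LEMMAS AND PROOFS =====

-- running minimum cell: `some (min-so-far)`, `none` = float("inf")
def pvMinO (acc : Option Int) (v : Int) : Option Int :=
  some (match acc with | none => v | some a => min a v)

-- positions of the ones among the first r indices (B's `positions`, A's implicit index set)
def pvOnes (dolls : List Int) (r : Nat) : List Int :=
  ((List.range r).map (fun i : Nat => (i : Int))).filter (fun i => PySem.List.pyGet? dolls i == some 1)

-- candidate window lengths: spans between one-positions k-1 apart
def pvVals (k : Int) (P : List Int) : List Int :=
  (P.zip (P.drop (k - 1).toNat)).map (fun p => p.2 - p.1 + 1)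

def pvM (k : Int) (P : List Int) : Option Int := (pvVals k P).foldl pvMinO none

def pvLeft (k : Int) (P : List Int) : Int :=
  if k ≤ (P.length : Int) then P.getD (P.length - k.toNat) 0 + 1 else 0

def pvLions (k : Int) (P : List Int) : Int := min (P.length : Int) (k - 1)

lemma pvOnes_succ (dolls : List Int) (r : Nat) :
    pvOnes dolls (r + 1) =
      pvOnes dolls r ++ (if PySem.List.pyGet? dolls (r : Int) == some 1 then [(r : Int)] else []) := by
  simp only [pvOnes, List.range_succ]
  split <;> simp_all

lemma mem_pvOnes (dolls : List Int) (r : Nat) (x : Int) :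
    x ∈ pvOnes dolls r ↔ 0 ≤ x ∧ x < (r : Int) ∧ PySem.List.pyGet? dolls x = some 1 := by
  unfold pvOnes
  rw [List.mem_filter, List.mem_map]
  simp only [List.mem_range, beq_iff_eq]
  constructor
  · rintro ⟨⟨i, hi, rfl⟩, h⟩
    exact ⟨Int.natCast_nonneg i, by exact_mod_cast hi, h⟩
  · rintro ⟨h0, hr, h1⟩
    exact ⟨⟨x.toNat, by omega, by omega⟩, h1⟩

lemma pairwise_pvOnes (dolls : List Int) (r : Nat) : (pvOnes dolls r).Pairwise (· < ·) := by
  apply List.Pairwise.filter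
  rw [List.pairwise_map]
  exact List.pairwise_lt_range.imp (fun h => by exact_mod_cast h)

lemma pvMinO_absorb (m : Option Int) (a b : Int) (h : b ≤ a) :
    pvMinO (pvMinO m a) b = pvMinO m b := by
  cases m <;> simp [pvMinO] <;> omega

lemma pvA_shrink_noop (dolls : List Int) (k right : Int) (fuel : Nat)
    (m : Option Int) (left lions : Int) (h : ¬ k ≤ lions) :
    pvA_shrink dolls k right fuel (m, left, lions) = (m, left, lions) := by
  cases fuel <;> simp [pvA_shrink, h]

-- the shrink loop walks left up to p (the first `1` in the window), records the shrinking
-- window lengths (whose minimum is attained at left = p), drops that `1` and stops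
lemma pvA_shrink_run (dolls : List Int) (k right p : Int)
    (hp1 : PySem.List.pyGet? dolls p = some 1) (hplen : p < (dolls.length : Int))
    (hpr : p ≤ right) :
    ∀ (fuel : Nat) (m : Option Int) (left : Int), 0 ≤ left → left ≤ p →
      (p - left).toNat + 1 ≤ fuel →
      (∀ i : Int, left ≤ i → i < p → ¬ PySem.List.pyGet? dolls i = some 1) →
      pvA_shrink dolls k right fuel (m, left, k) =
        (pvMinO m (right - p + 1), p + 1, k - 1) := by
  intro fuel
  induction fuel with
  | zero => intro m left _ _ hf; omega
  | succ f ih =>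
    intro m left h0 hlp _hf hz
    rcases eq_or_lt_of_le hlp with rfl | hlt
    · simp only [pvA_shrink, le_refl, if_pos, hp1]
      exact pvA_shrink_noop dolls k right f (pvMinO m (right - left + 1)) (left + 1) (k - 1)
        (by omega)
    · have hsome : ∃ d, PySem.List.pyGet? dolls left = some d := by
        apply Option.ne_none_iff_exists'.mp
        intro hnone
        rw [PySem.List.pyGet?_eq_none_iff] at hnone
        apply hnone
        simp only [PySem.Raise.InRange]
        omega
      obtain ⟨d, hd⟩ := hsome
      have hdne : d ≠ 1 := fun h => hz left le_rfl hlt (h ▸ hd)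
      simp only [pvA_shrink, le_refl, if_pos, hd, hdne, if_false]
      have := ih (pvMinO m (right - left + 1)) (left + 1) (by omega) (by omega) (by omega)
        (fun i hi1 hi2 => hz i (by omega) hi2)
      rw [pvMinO_absorb _ _ _ (by omega)] at this
      exact this

lemma zip_take_len {α β : Type} : ∀ (l : List α) (m : List β), (l.take m.length).zip m = l.zip m
  | [], _ => by simp
  | _ :: _, [] => by simp
  | a :: l, b :: m => by simp [zip_take_len l m]

-- appending a new position x extends the k-apart pair list by exactly one pair
lemma zip_drop_append {α : Type} [Inhabited α] (P : List α) (x d0 : α) (j : Nat) (hj : j ≤ P.length) :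
    (P ++ [x]).zip ((P ++ [x]).drop j) =
      P.zip (P.drop j) ++ [((P ++ [x]).getD (P.length - j) d0, x)] := by
  rw [List.drop_append_of_le_length hj]
  by_cases hd : P.length - j < P.length
  · have hgd : (P ++ [x]).getD (P.length - j) d0 = P[P.length - j] := by
      rw [List.getD_eq_getElem?_getD, List.getElem?_append_left hd, List.getElem?_eq_getElem hd]
      rfl
    rw [hgd]
    have hsplit : P ++ [x] = P.take (P.length - j) ++ (P[P.length - j] :: (P.drop (P.length - j + 1) ++ [x])) := by
      conv_lhs => rw [← List.take_append_drop (P.length - j) P, List.drop_eq_getElem_cons hd]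
      rw [List.append_assoc, List.cons_append]
    rw [hsplit, List.zip_append (by rw [List.length_take, List.length_drop]; omega)]
    simp only [List.zip_cons_cons, List.zip_nil_right]
    congr 1
    have h := zip_take_len P (P.drop j)
    rw [List.length_drop] at h
    exact h
  · have hj0 : j = 0 := by omega
    subst hj0
    rw [List.drop_zero, List.zip_append rfl]
    simp [List.getD_eq_getElem?_getD]

-- A's loop state after the first r iterations, as a function of the one-positions table
lemma invariantA (dolls : List Int) (k : Int) (hk : 1 ≤ k) :
    ∀ r : Nat, r ≤ dolls.length →
      ((List.range r).map (fun i : Nat => (i : Int))).foldl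
        (fun (st : Option Int × Int × Int) right =>
          pvA_shrink dolls k right (dolls.length + 1)
            (st.1, st.2.1, if PySem.List.pyGet? dolls right = some 1 then st.2.2 + 1 else st.2.2))
        (none, 0, 0)
      = (pvM k (pvOnes dolls r), pvLeft k (pvOnes dolls r), pvLions k (pvOnes dolls r)) := by
  intro r
  induction r with
  | zero =>
    intro _
    simp only [List.range_zero, List.map_nil, List.foldl_nil]
    unfold pvOnes pvM pvVals pvLeft pvLions
    simp only [List.range_zero, List.map_nil, List.filter_nil, List.drop_nil,
      List.zip_nil_right, List.foldl_nil, List.length_nil, Nat.cast_zero]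
    rw [if_neg (by omega)]
    refine Prod.ext rfl (Prod.ext rfl ?_)
    show (0 : Int) = min 0 (k - 1)
    omega
  | succ r ih =>
    intro hr
    set P := pvOnes dolls r with hPdef
    set c := P.length with hcdef
    rw [List.range_succ, List.map_append, List.foldl_append, ih (by omega)]
    simp only [List.map_cons, List.map_nil, List.foldl_cons, List.foldl_nil]
    by_cases h1 : PySem.List.pyGet? dolls (r : Int) = some 1
    · have hP' : pvOnes dolls (r + 1) = P ++ [(r : Int)] := by
        rw [pvOnes_succ]; simp [h1, ← hPdef]
      by_cases hsmall : (c : Int) + 1 < k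
      · -- not enough ones yet: the while loop does not fire
        have hmin : pvLions k P = (c : Int) := by unfold pvLions; omega
        rw [if_pos h1, hmin, pvA_shrink_noop _ _ _ _ _ _ _ (by omega), hP']
        have hd1 : P.drop (k - 1).toNat = [] := List.drop_eq_nil_of_le (by omega)
        have hd2 : (P ++ [(r : Int)]).drop (k - 1).toNat = [] :=
          List.drop_eq_nil_of_le (by simp; omega)
        unfold pvM pvVals pvLeft pvLions
        rw [hd1, hd2]
        simp only [List.zip_nil_right, List.map_nil, List.foldl_nil, List.length_append,
          List.length_singleton]
        simp only [Prod.mk.injEq]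
        refine ⟨trivial, ?_, ?_⟩
        · rw [if_neg (by omega), if_neg (by push_cast; omega)]
        · push_cast; omega
      · -- the window now holds k ones: run the shrink loop up to p = P'[c+1-k]
        have hkc : k ≤ (c : Int) + 1 := by omega
        set P' := P ++ [(r : Int)] with hP'def
        have hlenP' : P'.length = c + 1 := by rw [hP'def]; simp [hcdef]
        have hidx : c + 1 - k.toNat < P'.length := by omega
        set p := P'.getD (c + 1 - k.toNat) 0 with hpdef
        have hpget : p = P'[c + 1 - k.toNat] := List.getD_eq_getElem P' 0 hidx
        have hpmem : p ∈ pvOnes dolls (r + 1) := by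
          rw [hP', hpget]; exact List.getElem_mem hidx
        rw [mem_pvOnes] at hpmem
        obtain ⟨hp0, hpr', hp1⟩ := hpmem
        have hpair : P'.Pairwise (· < ·) := by
          have := pairwise_pvOnes dolls (r + 1)
          rwa [hP'] at this
        have hmono := List.pairwise_iff_getElem.mp hpair
        have hmemP : ∀ y ∈ P, 0 ≤ y := by
          intro y hy
          rw [hPdef, mem_pvOnes] at hy
          exact hy.1
        -- the left pointer and the no-one gap below p
        have hleft0 : 0 ≤ pvLeft k P := by
          unfold pvLeft
          split
          · rename_i hkle
            have hclt : c - k.toNat < c := by omega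
            have := hmemP _ (List.getElem_mem (l := P) (n := c - k.toNat) hclt)
            rw [List.getD_eq_getElem P 0 hclt]
            omega
          · exact le_refl 0
        have hleftle : pvLeft k P ≤ p := by
          unfold pvLeft
          split
          · rename_i hkle
            have hcltc : c - k.toNat < c := by omega
            have hidx2 : (c - k.toNat : Nat) < c + 1 - k.toNat := by omega
            have hgl : P.getD (c - k.toNat) 0 = P'[(c - k.toNat : Nat)]'(by omega) := by
              rw [List.getD_eq_getElem P 0 hcltc]
              exact (List.getElem_append_left hcltc).symm
            have := hmono (c - k.toNat) (c + 1 - k.toNat) (by omega) hidx (by omega)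
            rw [hgl, hpget]
            omega
          · exact hp0
        have hz : ∀ i : Int, pvLeft k P ≤ i → i < p → ¬ PySem.List.pyGet? dolls i = some 1 := by
          intro i hi1 hi2 hcon
          have hiP' : i ∈ P' := by
            rw [← hP', mem_pvOnes]
            exact ⟨by omega, by omega, hcon⟩
          obtain ⟨t, ht, hti⟩ := List.mem_iff_getElem.mp hiP'
          have htlt : t < c + 1 - k.toNat := by
            by_contra hge
            rw [not_lt] at hge
            rcases eq_or_lt_of_le hge with heq | hgt
            · have hip : i = p := by
                rw [← hti, hpget]
                congr 1
                omega
              omega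
            · have := hmono _ _ hidx ht hgt
              rw [hti, ← hpget] at this
              omega
          -- so t lies strictly below the window start: contradiction with left ≤ i
          unfold pvLeft at hi1
          split at hi1
          · rename_i hkle
            have hcltc : c - k.toNat < c := by omega
            have hgl : P.getD (c - k.toNat) 0 = P'[(c - k.toNat : Nat)]'(by omega) := by
              rw [List.getD_eq_getElem P 0 hcltc]
              exact (List.getElem_append_left hcltc).symm
            have hle : P'[t] ≤ P'[(c - k.toNat : Nat)]'(by omega) := by
              rcases eq_or_lt_of_le (by omega : t ≤ c - k.toNat) with heq | hlt2
              · subst heq; exact le_refl _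
              · exact le_of_lt (hmono _ _ ht (by omega) hlt2)
            rw [hti] at hle
            rw [hgl] at hi1
            omega
          · -- left = 0 and k = c+1: the window starts at 0, so idx = 0, t < 0 impossible
            rename_i hnkle
            omega
        have hlions : min (c : Int) (k - 1) + 1 = k := by omega
        rw [if_pos h1]
        show pvA_shrink dolls k (r : Int) (dolls.length + 1)
            (pvM k P, pvLeft k P, pvLions k P + 1) = _
        rw [show pvLions k P + 1 = k from by unfold pvLions; omega]
        rw [pvA_shrink_run dolls k (r : Int) p hp1 (by omega) (by omega)
          (dolls.length + 1) (pvM k P) (pvLeft k P) hleft0 hleftle (by omega) hz]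
        rw [hP']
        -- now compute the spec state of P' componentwise
        have hjle : (k - 1).toNat ≤ c := by omega
        have hvals : pvVals k P' = pvVals k P ++ [(r : Int) - p + 1] := by
          have hidxeq : P.length - (k - 1).toNat = c + 1 - k.toNat := by omega
          unfold pvVals
          rw [hP'def, zip_drop_append P ((r : Int)) 0 _ hjle, List.map_append]
          simp only [List.map_cons, List.map_nil]
          rw [hidxeq, hpdef, hP'def]
        refine Prod.ext ?_ (Prod.ext ?_ ?_)
        · show pvMinO (pvM k P) ((r : Int) - p + 1) = pvM k (P ++ [(r : Int)])
          rw [← hP'def]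
          unfold pvM
          rw [hvals, List.foldl_append]
          simp
        · show p + 1 = pvLeft k (P ++ [(r : Int)])
          rw [← hP'def]
          unfold pvLeft
          rw [if_pos (by rw [hlenP']; push_cast; omega)]
          have hli : P'.length - k.toNat = c + 1 - k.toNat := by rw [hlenP']
          rw [hli, ← hpdef]
        · show k - 1 = pvLions k (P ++ [(r : Int)])
          rw [← hP'def]
          unfold pvLions
          rw [hlenP']
          push_cast
          omega
    · -- dolls[r] is not a 1: nothing changes
      have hP' : pvOnes dolls (r + 1) = P := by
        rw [PySem.List.pyGet?_natCast] at h1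
        rw [pvOnes_succ]
        simp [PySem.List.pyGet?_natCast, h1, ← hPdef]
      rw [if_neg h1, hP']
      exact pvA_shrink_noop _ _ _ _ _ _ _ (by unfold pvLions; omega)

-- ===== VERDICT (by name: the statement is the Claim_ definition above) =====
theorem find_min_subarray_len_spec : Claim_equal_find_min_subarray_len := by
  intro n k dolls _dom hpre
  obtain ⟨hn, hk⟩ := hpre
  unfold Spec_find_min_subarray_len find_min_subarray_len find_min_subarray_len_alt
  rw [PySem.List.pyRange_one]
  simp only [Int.sub_zero, zero_add]
  rw [invariantA dolls k hk n.toNat (by omega)]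
  show (match pvM k (pvOnes dolls n.toNat) with | some v => v | none => -1) = _
  have hposB : ((List.range n.toNat).map (fun i : Nat => (i : Int))).filter
      (fun i => PySem.List.pyGet? dolls i == some 1) = pvOnes dolls n.toNat := rfl
  rw [hposB]
  set P := pvOnes dolls n.toNat with hPdef
  by_cases hlt : (P.length : Int) < k
  · rw [if_pos hlt]
    have hd : P.drop (k - 1).toNat = [] := List.drop_eq_nil_of_le (by omega)
    have : pvM k P = none := by unfold pvM pvVals; rw [hd]; simp
    rw [this]
  · rw [if_neg hlt]
    have hsl : PySem.List.slice P (some (k - 1)) none = P.drop (k - 1).toNat := by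
      rw [show (k - 1 : Int) = (((k - 1).toNat : Nat) : Int) from by omega,
        PySem.List.slice_from_natCast]
      simp
    rw [hsl]
    have hfold : (P.zip (P.drop (k - 1).toNat)).foldl
        (fun (acc : Option Int) p =>
          some (match acc with | none => p.2 - p.1 + 1 | some a => min a (p.2 - p.1 + 1))) none
        = pvM k P := by
      unfold pvM pvVals
      rw [List.foldl_map]
      rfl
    rw [hfold]
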